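-- pv_equiv track=rewrite | github.com/tamireshc/trybe-exercicios | ciencia-da-computacao/bloco-37-estrutura-de-dados-i-arrays-listas-filas-e-pilhas/dia-1-arrays/exe1.py | max_time_stable
-- ===== SOURCE A (Python) =====
-- def max_time_stable(array: list):
--     index_of_zeros = []
--     array_instable_time = []
--
--     for index, item in enumerate(array):
--         if item == 0:
--             idx = index
--             index_of_zeros.append(idx)
--         else:
--             pass
--     index_of_zeros.append(len(array))
--
--     if index_of_zeros[0] == 0:
--         for index, item in enumerate(index_of_zeros):
--             if index < (len(index_of_zeros) - 1):
--                 array_instable_time.append(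
--                     index_of_zeros[index + 1] - index_of_zeros[index] - 1
--                 )
--             else:
--                 pass
--     else:
--         array_instable_time.append(index_of_zeros[0])
--         for index, item in enumerate(index_of_zeros):
--             if index < (len(index_of_zeros) - 1):
--                 array_instable_time.append(
--                     index_of_zeros[index + 1] - index_of_zeros[index] - 1
--                 )
--             else:
--                 pass
--
--     return array_instable_time
-- ===== SOURCE B (Python) =====
-- def max_time_stable(array: list):
--     # Return value only; single-pass run-length counter, no index list.
--     if not array:
--         return []
--     runs = []
--     count = 0
--     for item in array:
--         if item == 0:
--             runs.append(count)
--             count = 0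
--         else:
--             count += 1
--     runs.append(count)
--     return runs[1:] if array[0] == 0 else runs
-- ===== Notes on version B (the rewrite author's own statement) =====
-- stated objective: simpler
-- what changed: B replaces A's two-phase algorithm (collect all zero indices, then a second indexed loop taking adjacent differences) with a single run-length counting pass over the elements, dropping the always-zero leading run when the array starts with 0.
import Mathlib
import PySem

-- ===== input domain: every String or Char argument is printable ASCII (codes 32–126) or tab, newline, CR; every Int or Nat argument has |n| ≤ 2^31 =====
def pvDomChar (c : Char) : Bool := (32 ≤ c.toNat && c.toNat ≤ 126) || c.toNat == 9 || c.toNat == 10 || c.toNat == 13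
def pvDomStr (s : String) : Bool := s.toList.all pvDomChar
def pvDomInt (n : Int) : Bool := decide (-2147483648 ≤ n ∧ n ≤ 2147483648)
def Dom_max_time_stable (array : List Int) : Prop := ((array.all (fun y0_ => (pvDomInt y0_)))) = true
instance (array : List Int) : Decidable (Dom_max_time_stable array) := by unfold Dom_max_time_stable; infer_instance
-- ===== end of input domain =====

-- B replaces A's two-phase zero-index/difference algorithm with a single run-length counting pass (simpler decomposition); return value only.


-- ===== PORT A =====
def max_time_stable (array : List Int) : List Int :=
  let index_of_zeros :=
    (PySem.List.enumerate array).foldl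
      (fun acc (p : Int × Int) => if p.2 = 0 then acc ++ [p.1] else acc) ([] : List Int)
  let index_of_zeros := index_of_zeros ++ [(array.length : Int)]
  let array_instable_time :=
    (PySem.List.enumerate index_of_zeros).foldl
      (fun acc (p : Int × Int) =>
        if p.1 < (index_of_zeros.length : Int) - 1 then
          acc ++ [PySem.List.pyGetD index_of_zeros (p.1 + 1) 0
                  - PySem.List.pyGetD index_of_zeros p.1 0 - 1]
        else acc) ([] : List Int)
  if PySem.List.pyGetD index_of_zeros 0 0 = 0 then
    array_instable_time
  else
    PySem.List.pyGetD index_of_zeros 0 0 :: array_instable_time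

-- ===== PORT B =====
def max_time_stable_alt (array : List Int) : List Int :=
  if array = [] then []
  else
    let s := array.foldl
      (fun (s : List Int × Int) item =>
        if item = 0 then (s.1 ++ [s.2], 0) else (s.1, s.2 + 1))
      (([] : List Int), (0 : Int))
    let runs := s.1 ++ [s.2]
    if PySem.List.pyGetD array 0 0 = 0 then PySem.List.slice runs (some 1) none else runs

-- ===== PRECONDITION & SPEC =====
def Spec_max_time_stable (array : List Int) (out : List Int) : Prop := out = max_time_stable_alt array
instance (array : List Int) (out : List Int) : Decidable (Spec_max_time_stable array out) := by unfold Spec_max_time_stable; infer_instance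

-- ===== CLAIM (what is proved, stated in full; the proofs are below) =====
def Claim_equal_max_time_stable : Prop := ∀ (array : List Int), Dom_max_time_stable array → Spec_max_time_stable array (max_time_stable array)

-- ===== LEMMAS AND PROOFS =====

-- positions of the zeros of xs, counting from s (A's first loop, cleanly)
def pvZidx : List Int → Int → List Int
  | [], _ => []
  | x :: xs, s => if x = 0 then s :: pvZidx xs (s + 1) else pvZidx xs (s + 1)

-- adjacent differences minus one (A's second loop, cleanly)
def pvDiffs : List Int → List Int
  | [] => []
  | [_] => []
  | a :: b :: l => (b - a - 1) :: pvDiffs (b :: l)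

-- B's run-length counter, cleanly
def pvBrec : List Int → Int → List Int
  | [], c => [c]
  | x :: xs, c => if x = 0 then c :: pvBrec xs 0 else pvBrec xs (c + 1)

theorem pvFoldA1 (xs : List Int) : ∀ (s : Int) (acc : List Int),
    (PySem.List.enumerate xs s).foldl
      (fun acc (p : Int × Int) => if p.2 = 0 then acc ++ [p.1] else acc) acc
      = acc ++ pvZidx xs s := by
  induction xs with
  | nil => intro s acc; simp [PySem.List.enumerate_nil, pvZidx]
  | cons x xs ih =>
    intro s acc
    simp only [PySem.List.enumerate_cons, List.foldl_cons, pvZidx]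
    by_cases hx : x = 0 <;> simp [hx, ih]

theorem pvFoldB (xs : List Int) : ∀ (acc : List Int) (c : Int),
    (let s := xs.foldl
        (fun (s : List Int × Int) item =>
          if item = 0 then (s.1 ++ [s.2], 0) else (s.1, s.2 + 1)) (acc, c);
      s.1 ++ [s.2]) = acc ++ pvBrec xs c := by
  induction xs with
  | nil => intro acc c; simp [pvBrec]
  | cons x xs ih =>
    intro acc c
    simp only [List.foldl_cons, pvBrec]
    by_cases hx : x = 0 <;> simp [hx, ih]

theorem pvFoldA2 (L : List Int) : ∀ (pre acc M : List Int), M = pre ++ L →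
    (PySem.List.enumerate L (pre.length : Int)).foldl
      (fun acc (p : Int × Int) =>
        if p.1 < (M.length : Int) - 1 then
          acc ++ [PySem.List.pyGetD M (p.1 + 1) 0 - PySem.List.pyGetD M p.1 0 - 1]
        else acc) acc
      = acc ++ pvDiffs L := by
  induction L with
  | nil => intro pre acc M _; simp [PySem.List.enumerate_nil, pvDiffs]
  | cons x L ih =>
    intro pre acc M hM
    cases L with
    | nil =>
      subst hM
      simp [PySem.List.enumerate_cons, PySem.List.enumerate_nil, pvDiffs]
    | cons y rest =>
      subst hM
      have hlen : ((pre.length : Int)) < ((pre ++ x :: y :: rest).length : Int) - 1 := by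
        simp; omega
      have hx : PySem.List.pyGetD (pre ++ x :: y :: rest) (pre.length : Int) 0 = x := by
        simp [PySem.List.pyGetD_natCast]
      have hy : PySem.List.pyGetD (pre ++ x :: y :: rest) ((pre.length : Int) + 1) 0 = y := by
        have hsplit : pre ++ x :: y :: rest = (pre ++ [x]) ++ y :: rest := by simp
        rw [hsplit]
        have h1 : ((pre.length : Int) + 1) = (((pre ++ [x]).length : Nat) : Int) := by simp
        rw [h1, PySem.List.pyGetD_natCast]
        simp
      rw [PySem.List.enumerate_cons, List.foldl_cons]
      rw [if_pos hlen, hx, hy]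
      have h1 : (pre.length : Int) + 1 = (((pre ++ [x]).length : Nat) : Int) := by simp
      rw [h1, ih (pre ++ [x]) _ _ (by simp)]
      simp [pvDiffs]

theorem pvZidx_shift (xs : List Int) : ∀ (s : Int),
    pvZidx xs (s + 1) = (pvZidx xs s).map (· + 1) := by
  induction xs with
  | nil => intro s; simp [pvZidx]
  | cons x xs ih =>
    intro s
    by_cases hx : x = 0 <;> simp [pvZidx, hx, ih (s + 1)]

theorem pvDiffs_map (L : List Int) : pvDiffs (L.map (· + 1)) = pvDiffs L := by
  induction L with
  | nil => simp [pvDiffs]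
  | cons a L ih =>
    cases L with
    | nil => simp [pvDiffs]
    | cons b l =>
      simp only [List.map_cons, pvDiffs] at *
      have harith : b + 1 - (a + 1) - 1 = b - a - 1 := by ring
      rw [harith, ih]

-- bump the first element of a list by one
def pvBump : List Int → List Int
  | [] => []
  | a :: l => (a + 1) :: l

theorem pvBrec_succ (xs : List Int) : ∀ (c : Int),
    pvBrec xs (c + 1) = pvBump (pvBrec xs c) := by
  induction xs with
  | nil => intro c; simp [pvBrec, pvBump]
  | cons x xs ih =>
    intro c
    by_cases hx : x = 0 <;> simp [pvBrec, pvBump, hx, ih (c + 1)]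

theorem pvZidx_ge (xs : List Int) : ∀ (s a : Int), a ∈ pvZidx xs s → s ≤ a := by
  induction xs with
  | nil => intro s a h; simp [pvZidx] at h
  | cons x xs ih =>
    intro s a h
    by_cases hx : x = 0
    · simp [pvZidx, hx] at h
      rcases h with h | h
      · omega
      · have := ih (s + 1) a h; omega
    · simp [pvZidx, hx] at h
      have := ih (s + 1) a h; omega

theorem pvMain (xs : List Int) :
    pvBrec xs 0
      = (pvZidx xs 0 ++ [(xs.length : Int)]).headD 0
        :: pvDiffs (pvZidx xs 0 ++ [(xs.length : Int)]) := by
  induction xs with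
  | nil => simp [pvBrec, pvZidx, pvDiffs]
  | cons x xs ih =>
    have hmap : pvZidx xs (0 + 1) ++ [((x :: xs).length : Int)]
        = (pvZidx xs 0 ++ [(xs.length : Int)]).map (· + 1) := by
      rw [pvZidx_shift]; simp
    by_cases hx : x = 0
    · have hb : pvBrec (x :: xs) 0 = 0 :: pvBrec xs 0 := by simp [pvBrec, hx]
      have hz : pvZidx (x :: xs) 0 = 0 :: pvZidx xs (0 + 1) := by simp [pvZidx, hx]
      rw [hb, ih, hz, List.cons_append, hmap]
      cases hL : pvZidx xs 0 ++ [(xs.length : Int)] with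
      | nil => simp at hL
      | cons h t =>
        have hdm : pvDiffs ((h + 1) :: t.map (· + 1)) = pvDiffs (h :: t) := by
          have h2 := pvDiffs_map (h :: t)
          simpa using h2
        simp [pvDiffs, hdm]
    · have hb : pvBrec (x :: xs) 0 = pvBrec xs (0 + 1) := by simp [pvBrec, hx]
      have hz : pvZidx (x :: xs) 0 = pvZidx xs (0 + 1) := by simp [pvZidx, hx]
      rw [hb, pvBrec_succ xs 0, ih, hz, hmap]
      cases hL : pvZidx xs 0 ++ [(xs.length : Int)] with
      | nil => simp at hL
      | cons h t =>
        have hdm : pvDiffs ((h + 1) :: t.map (· + 1)) = pvDiffs (h :: t) := by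
          have h2 := pvDiffs_map (h :: t)
          simpa using h2
        simp [pvBump, hdm]

theorem pvA_eq (array : List Int) :
    max_time_stable array
      = (if (pvZidx array 0 ++ [(array.length : Int)]).headD 0 = 0 then
          pvDiffs (pvZidx array 0 ++ [(array.length : Int)])
        else
          (pvZidx array 0 ++ [(array.length : Int)]).headD 0
            :: pvDiffs (pvZidx array 0 ++ [(array.length : Int)])) := by
  unfold max_time_stable
  rw [pvFoldA1 array 0 []]
  simp only [List.nil_append]
  have h2 := pvFoldA2 (pvZidx array 0 ++ [(array.length : Int)]) [] []
      (pvZidx array 0 ++ [(array.length : Int)]) (by simp)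
  simp only [List.length_nil, Nat.cast_zero, List.nil_append] at h2
  rw [h2]
  have hhd : PySem.List.pyGetD (pvZidx array 0 ++ [(array.length : Int)]) 0 0
      = (pvZidx array 0 ++ [(array.length : Int)]).headD 0 := by
    cases hL : pvZidx array 0 ++ [(array.length : Int)] with
    | nil => simp at hL
    | cons h t => simp [PySem.List.pyGetD_zero]
  rw [hhd]

theorem pvB_eq (array : List Int) (h : array ≠ []) :
    max_time_stable_alt array
      = (if PySem.List.pyGetD array 0 0 = 0 then (pvBrec array 0).tail
         else pvBrec array 0) := by
  unfold max_time_stable_alt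
  rw [if_neg h]
  have h3 := pvFoldB array [] 0
  simp only [List.nil_append] at h3
  simp only [h3, PySem.List.slice_from_one]

-- ===== VERDICT (by name: the statement is the Claim_ definition above) =====
theorem max_time_stable_spec : Claim_equal_max_time_stable := by
  intro array _
  unfold Spec_max_time_stable
  cases array with
  | nil =>
    rw [pvA_eq]
    simp [pvZidx, pvDiffs, max_time_stable_alt]
  | cons x xs =>
    rw [pvA_eq, pvB_eq (x :: xs) (by simp)]
    have hget : PySem.List.pyGetD (x :: xs) 0 0 = x := by
      simp [PySem.List.pyGetD_zero]
    by_cases hx : x = 0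
    · have hz : pvZidx (x :: xs) 0 = 0 :: pvZidx xs (0 + 1) := by simp [pvZidx, hx]
      have hhead : (pvZidx (x :: xs) 0 ++ [((x :: xs).length : Int)]).headD 0 = 0 := by
        rw [hz]; simp
      rw [if_pos hhead, if_pos (by rw [hget, hx]), pvMain]
      simp
    · have hpos : 0 < (pvZidx (x :: xs) 0 ++ [((x :: xs).length : Int)]).headD 0 := by
        have hz : pvZidx (x :: xs) 0 = pvZidx xs (0 + 1) := by simp [pvZidx, hx]
        rw [hz, pvZidx_shift]
        cases h0 : pvZidx xs 0 with
        | nil => simp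
        | cons h t =>
          have hge : (0 : Int) ≤ h := pvZidx_ge xs 0 h (by rw [h0]; exact List.mem_cons_self)
          simp; omega
      rw [if_neg (by omega), if_neg (by rw [hget]; exact hx), pvMain]
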